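-- pv_equiv track=rewrite | github.com/timtheswan/checkers | P2.py | listCrowningJumps
-- ===== SOURCE A (Python) =====
-- def listCrowningJumps(board,player,jumpsList):
--
--     crowningJumps = []
--     jumpsDupe=jumpsList[:]
--     removes=[]
--     if len(jumpsList)==0:
--         return crowningJumps,jumpsList
--     for i in range(len(jumpsList)):
--         if 'A' in jumpsDupe[i] and player == 'b' and not board[int(jumpsDupe[i][1])][ord(jumpsDupe[i][0])-65]=='B':
--             crowningJumps.append(jumpsDupe[i])
--             removes.append(i)
--         elif 'H' in jumpsDupe[i] and player == 'r' and not board[int(jumpsDupe[i][1])][ord(jumpsDupe[i][0])-65]=='R':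
--             crowningJumps.append(jumpsDupe[i])
--             removes.append(i)
--     for i in range(len(removes)-1,-1,-1):
--         jumpsList.pop(removes[i])
--     return crowningJumps,jumpsList
-- ===== SOURCE B (Python) =====
-- def listCrowningJumps(board, player, jumpsList):
--     def crowns(j):
--         if player == 'b' and 'A' in j:
--             return board[int(j[1])][ord(j[0]) - 65] != 'B'
--         if player == 'r' and 'H' in j:
--             return board[int(j[1])][ord(j[0]) - 65] != 'R'
--         return False
--     crowningJumps = [j for j in jumpsList if crowns(j)]
--     jumpsList[:] = [j for j in jumpsList if not crowns(j)]
--     return crowningJumps, jumpsList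
-- ===== Notes on version B (the rewrite author's own statement) =====
-- stated objective: simpler
-- what changed: Replaces the two-pass scheme (record matching indices, then pop them from the list in reverse) by a single partition predicate applied in one pass, with the kept elements written back via slice assignment so the same list object is mutated.
import Mathlib
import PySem

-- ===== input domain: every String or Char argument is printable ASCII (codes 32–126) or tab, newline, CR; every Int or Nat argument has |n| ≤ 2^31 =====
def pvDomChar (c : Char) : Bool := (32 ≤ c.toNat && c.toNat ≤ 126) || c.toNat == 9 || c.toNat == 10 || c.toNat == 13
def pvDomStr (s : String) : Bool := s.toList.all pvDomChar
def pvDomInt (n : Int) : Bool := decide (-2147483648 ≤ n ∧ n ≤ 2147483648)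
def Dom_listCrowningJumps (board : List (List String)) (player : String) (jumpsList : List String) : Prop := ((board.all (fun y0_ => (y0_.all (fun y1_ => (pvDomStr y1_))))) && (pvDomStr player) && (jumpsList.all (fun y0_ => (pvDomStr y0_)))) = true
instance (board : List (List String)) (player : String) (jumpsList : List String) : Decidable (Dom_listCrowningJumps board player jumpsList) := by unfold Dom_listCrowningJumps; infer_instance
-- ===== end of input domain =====

-- B replaces A's record-indices-then-reverse-pop two-pass scheme by a single partition predicate
-- (objective: simpler); equivalence is about the RETURN value — both Pythons mutate jumpsList to the same final content.

-- ===== PORT A =====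
-- board[int(j[1])][ord(j[0])-65] ; defaults only reached outside Pre_ (where Python A raises)
def pvCellA (board : List (List String)) (j : String) : String :=
  let r : Int := (PySem.Int.ofChars? [(PySem.Str.pyGet? j 1).getD ' ']).getD 0
  let c : Int := (((PySem.Str.pyGet? j 0).getD ' ').toNat : Int) - 65
  (PySem.List.pyGet? ((PySem.List.pyGet? board r).getD []) c).getD ""

def pvCondA (board : List (List String)) (player : String) (j : String) : Bool :=
  PySem.Str.isIn "A" j && player == "b" && !(pvCellA board j == "B")

def pvCondH (board : List (List String)) (player : String) (j : String) : Bool :=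
  PySem.Str.isIn "H" j && player == "r" && !(pvCellA board j == "R")

-- jumpsList.pop(i) used for its mutation only (index always in range when A returns)
def pvPopAt (jl : List String) (i : Int) : List String :=
  match PySem.List.pop? jl i with
  | some r => r.2
  | none => jl

def listCrowningJumps (board : List (List String)) (player : String) (jumpsList : List String) : List String × List String :=
  let jumpsDupe := jumpsList
  if jumpsList.length == 0 then ([], jumpsList)
  else
    let st :=
      (PySem.List.pyRange 0 (jumpsList.length : Int) 1).foldl
        (fun (st : List String × List Int) i =>
          let j := PySem.List.pyGetD jumpsDupe i ""
          if pvCondA board player j then (st.1 ++ [j], st.2 ++ [i])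
          else if pvCondH board player j then (st.1 ++ [j], st.2 ++ [i])
          else st) ([], [])
    let jl :=
      (PySem.List.pyRange ((st.2.length : Int) - 1) (-1) (-1)).foldl
        (fun jl k => pvPopAt jl (PySem.List.pyGetD st.2 k 0)) jumpsList
    (st.1, jl)

-- ===== PORT B =====
def pvCellB (board : List (List String)) (j : String) : String :=
  let r : Int := (PySem.Int.ofChars? [(PySem.Str.pyGet? j 1).getD ' ']).getD 0
  let c : Int := (((PySem.Str.pyGet? j 0).getD ' ').toNat : Int) - 65
  (PySem.List.pyGet? ((PySem.List.pyGet? board r).getD []) c).getD ""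

def pvCrowns (board : List (List String)) (player : String) (j : String) : Bool :=
  if player == "b" && PySem.Str.isIn "A" j then !(pvCellB board j == "B")
  else if player == "r" && PySem.Str.isIn "H" j then !(pvCellB board j == "R")
  else false

def listCrowningJumps_alt (board : List (List String)) (player : String) (jumpsList : List String) : List String × List String :=
  (jumpsList.filter (fun j => pvCrowns board player j),
   jumpsList.filter (fun j => !(pvCrowns board player j)))

-- ===== PRECONDITION & SPEC =====
-- whether evaluating board[int(j[1])][ord(j[0])-65] for jump j succeeds in Python
def pvSafe (board : List (List String)) (j : String) : Bool :=
  match j.toList[0]?, j.toList[1]? with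
  | some c0, some c1 =>
    match PySem.Int.ofChars? [c1] with
    | some r =>
      0 ≤ r && r < (board.length : Int) &&
      (-(((board.getD r.toNat []).length : Int)) ≤ ((c0.toNat : Int) - 65) &&
       ((c0.toNat : Int) - 65) < ((board.getD r.toNat []).length : Int))
    | none => false
  | _, _ => false

-- Pre_ excludes exactly the inputs where Python A raises (IndexError/ValueError while evaluating
-- board[int(j[1])][ord(j[0])-65] for a jump that reaches that subexpression).
def Pre_listCrowningJumps (board : List (List String)) (player : String) (jumpsList : List String) : Prop :=
  ∀ j ∈ jumpsList,
    ((PySem.Str.isIn "A" j && player == "b") || (PySem.Str.isIn "H" j && player == "r")) = true →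
    pvSafe board j = true

instance (board : List (List String)) (player : String) (jumpsList : List String) : Decidable (Pre_listCrowningJumps board player jumpsList) := by unfold Pre_listCrowningJumps; infer_instance

def pvWitness_listCrowningJumps : List (List String) × String × List String :=
  ([["b", "-"], ["-", "B"]], "b", ["A1E3"])

def Spec_listCrowningJumps (board : List (List String)) (player : String) (jumpsList : List String) (out : List String × List String) : Prop := out = listCrowningJumps_alt board player jumpsList
instance (board : List (List String)) (player : String) (jumpsList : List String) (out : List String × List String) : Decidable (Spec_listCrowningJumps board player jumpsList out) := by unfold Spec_listCrowningJumps; infer_instance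

-- ===== CLAIM (what is proved, stated in full; the proofs are below) =====
def Claim_equal_listCrowningJumps : Prop := ∀ (board : List (List String)) (player : String) (jumpsList : List String), Dom_listCrowningJumps board player jumpsList → Pre_listCrowningJumps board player jumpsList → Spec_listCrowningJumps board player jumpsList (listCrowningJumps board player jumpsList)

-- ===== LEMMAS AND PROOFS =====

theorem crowns_eq (board : List (List String)) (player : String) (j : String) :
    (pvCondA board player j || pvCondH board player j) = pvCrowns board player j := by
  unfold pvCondA pvCondH pvCrowns pvCellA pvCellB
  by_cases hb : player = "b" <;> by_cases hr : player = "r" <;> simp [hb, hr]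

theorem loop1_spec (board : List (List String)) (player : String) (xs : List String)
    (m : Nat) (hm : m ≤ xs.length) :
    (PySem.List.pyRange 0 (m : Int) 1).foldl
      (fun (st : List String × List Int) i =>
        let j := PySem.List.pyGetD xs i ""
        if pvCondA board player j then (st.1 ++ [j], st.2 ++ [i])
        else if pvCondH board player j then (st.1 ++ [j], st.2 ++ [i])
        else st) ([], [])
    = ((xs.take m).filter (fun j => pvCrowns board player j),
       ((List.range m).filter (fun k => pvCrowns board player (xs.getD k ""))).map
         (fun k : Nat => (k : Int))) := by
  induction m with
  | zero => simp [PySem.List.pyRange_one_eq_nil]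
  | succ n ih =>
    have h1 : ((n + 1 : Nat) : Int) = (n : Int) + 1 := by push_cast; ring
    rw [h1, PySem.List.pyRange_one_succ_right (by positivity), List.foldl_append,
        ih (by omega)]
    have hn : n < xs.length := by omega
    have hget : PySem.List.pyGetD xs (n : Int) "" = xs.getD n "" := by
      simp [PySem.List.pyGetD_natCast]
    have htake : xs.take (n + 1) = xs.take n ++ [xs.getD n ""] := by
      rw [List.take_add_one]
      simp [List.getD_eq_getElem?_getD, List.getElem?_eq_getElem hn]
    rw [List.range_succ]
    simp only [List.foldl_cons, List.foldl_nil, hget, htake, List.filter_append,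
               List.filter_cons, List.filter_nil, List.map_append]
    have hq := (crowns_eq board player (xs.getD n "")).symm
    cases hA : pvCondA board player (xs.getD n "") <;>
      cases hH : pvCondH board player (xs.getD n "") <;>
      rw [hA, hH] at hq <;> simp_all

theorem popAt_cons_succ (x : String) (t : List String) (k : Nat) :
    pvPopAt (x :: t) ((k : Int) + 1) = x :: pvPopAt t (k : Int) := by
  unfold pvPopAt
  by_cases hk : k < t.length
  · have h1 : ((k : Int) + 1) = ((k + 1 : Nat) : Int) := by push_cast; ring
    rw [h1, PySem.List.pop?_natCast (x :: t) (k + 1) (by simpa using Nat.succ_lt_succ hk),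
        PySem.List.pop?_natCast t k hk]
    simp
  · have h1 : PySem.List.pop? (x :: t) ((k : Int) + 1) = none := by
      simp [PySem.List.pop?, PySem.List.pyIdx?, hk]; omega
    have h2 : PySem.List.pop? t (k : Int) = none := by
      simp [PySem.List.pop?, PySem.List.pyIdx?, hk]
    rw [h1, h2]

theorem popFold_shift (x : String) (l : List Nat) :
    ∀ t : List String,
      (l.map (fun k : Nat => (k : Int) + 1)).foldl pvPopAt (x :: t)
        = x :: (l.map (fun k : Nat => (k : Int))).foldl pvPopAt t := by
  induction l with
  | nil => intro t; simp
  | cons a l ih =>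
    intro t
    simp only [List.map_cons, List.foldl_cons, popAt_cons_succ]
    exact ih (pvPopAt t (a : Int))

theorem idx_filter_cons (Q : String → Bool) (x : String) (t : List String) :
    (List.range (x :: t).length).filter (fun k => Q ((x :: t).getD k ""))
      = (if Q x then [0] else []) ++
        ((List.range t.length).filter (fun k => Q (t.getD k ""))).map (· + 1) := by
  simp only [List.length_cons, List.range_succ_eq_map, List.filter_cons, List.getD_cons_zero,
             List.filter_map]
  cases hx : Q x <;> simp [Function.comp_def]

theorem map_shift_cast (u : List Nat) :
    (u.map (· + 1)).map (fun k : Nat => (k : Int))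
      = u.map (fun k : Nat => (k : Int) + 1) := by
  rw [List.map_map]; apply List.map_congr_left; intro a _; simp

theorem popFold_filter (Q : String → Bool) :
    ∀ xs : List String,
      ((((List.range xs.length).filter (fun k => Q (xs.getD k ""))).map
          (fun k : Nat => (k : Int))).reverse).foldl pvPopAt xs
        = xs.filter (fun x => !Q x) := by
  intro xs
  induction xs with
  | nil => simp
  | cons x t ih =>
    rw [idx_filter_cons]
    cases hx : Q x
    · rw [if_neg (by simp [hx]), List.nil_append, map_shift_cast, ← List.map_reverse,
          popFold_shift x (((List.range t.length).filter (fun k => Q (t.getD k ""))).reverse) t,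
          List.map_reverse, ih]
      simp [List.filter_cons, hx]
    · rw [if_pos (by simp [hx]), List.singleton_append, List.map_cons, List.reverse_cons,
          map_shift_cast, List.foldl_append, ← List.map_reverse,
          popFold_shift x (((List.range t.length).filter (fun k => Q (t.getD k ""))).reverse) t,
          List.map_reverse, ih]
      simp [pvPopAt, List.filter_cons, hx]

-- ===== VERDICT (by name: the statement is the Claim_ definition above) =====
theorem listCrowningJumps_spec : Claim_equal_listCrowningJumps := by
  intro board player xs _ _
  show listCrowningJumps board player xs = listCrowningJumps_alt board player xs
  unfold listCrowningJumps listCrowningJumps_alt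
  by_cases h0 : xs.length = 0
  · rw [List.length_eq_zero_iff] at h0
    subst h0; simp
  · simp only [h0, beq_iff_eq, if_false]
    rw [loop1_spec board player xs xs.length le_rfl, List.take_length]
    set idxs := (List.range xs.length).filter (fun k => pvCrowns board player (xs.getD k "")) with hidxs
    set rem : List Int := idxs.map (fun k : Nat => (k : Int)) with hrem
    rw [show PySem.List.pyRange ((rem.length : Int) - 1) (-1) (-1)
          = (PySem.List.pyRange 0 (rem.length : Int) 1).reverse by
        rw [PySem.List.pyRange_neg_one_eq_reverse]; norm_num]
    rw [show ((PySem.List.pyRange 0 (rem.length : Int) 1).reverse.foldl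
            (fun jl k => pvPopAt jl (PySem.List.pyGetD rem k 0)) xs)
          = (((PySem.List.pyRange 0 (rem.length : Int) 1).reverse.map
                (fun k => PySem.List.pyGetD rem k 0)).foldl pvPopAt xs) from
        List.foldl_map.symm,
        List.map_reverse, PySem.List.map_pyGetD_pyRange_zero' rem 0, hrem, hidxs,
        popFold_filter (fun j => pvCrowns board player j) xs]
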